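-- pv_equiv track=rewrite | github.com/ciel-Cm/pyhton | evla/ip_correction.py | est_ip_valide
-- ===== SOURCE A (Python) =====
-- def est_segment_valide(segment):
--     etat = None
--
--     numhex = "0123456789ABCDEF"
--
--     if len(segment)== 2:
--         for caracater in segment:
--             if not caracater in  numhex:
--                 etat= False
--
--                 break
--             else:
--                 etat=  True
--     else:
--         etat = False
--
--     return etat
--
-- def est_ip_valide(ip):
--     etat = True
--     mesSegments = ip.split(":" if ":" in ip else "-")
--     if len(mesSegments)== 6:
--         for segment in mesSegments:
--             if not est_segment_valide(segment):
--                 etat = False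
--                 break
--             else:
--                 etat = True
--     else:
--         etat = False
--     return etat
-- ===== SOURCE B (Python) =====
-- def est_ip_valide(ip):
--     # single left-to-right scan with a (chars-in-segment, segment-count) state,
--     # instead of A's split + nested per-segment loops
--     sep = ":" if ":" in ip else "-"
--     hexd = "0123456789ABCDEF"
--     pos = 0    # characters seen in the current segment
--     segs = 1   # index of the current segment
--     for c in ip:
--         if c == sep:
--             if pos != 2:
--                 return False
--             segs += 1
--             pos = 0
--         else:
--             if pos == 2 or c not in hexd:
--                 return False
--             pos += 1
--     return segs == 6 and pos == 2
-- ===== Notes on version B (the rewrite author's own statement) =====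
-- stated objective: alternative
-- what changed: Replaced split-on-separator plus a nested per-segment validation loop by a single left-to-right character scan that tracks (chars-in-current-segment, segment-count) and rejects early.
import Mathlib
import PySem

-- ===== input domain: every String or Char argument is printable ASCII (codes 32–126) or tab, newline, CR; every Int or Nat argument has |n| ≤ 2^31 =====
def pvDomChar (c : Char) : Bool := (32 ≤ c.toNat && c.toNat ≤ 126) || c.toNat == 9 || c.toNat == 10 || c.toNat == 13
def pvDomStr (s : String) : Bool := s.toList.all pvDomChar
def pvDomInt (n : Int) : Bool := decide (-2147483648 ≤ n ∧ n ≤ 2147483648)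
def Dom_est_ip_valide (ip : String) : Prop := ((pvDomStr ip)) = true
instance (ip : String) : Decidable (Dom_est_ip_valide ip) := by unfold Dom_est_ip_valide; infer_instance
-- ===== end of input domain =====

-- B replaces A's split + nested per-segment loop by one character scan with a small state; alternative algorithm, same cost.

-- ===== PORT A =====
-- 'caracater in numhex' on the string of hex digits
def hexA (c : Char) : Bool := PySem.Chars.isIn [c] "0123456789ABCDEF".toList

-- the inner 'for caracater in segment' loop of est_segment_valide, carrying etat (None = Python None)
def segLoopA : List Char → Option Bool → Option Bool
  | [], etat => etat
  | c :: rest, _etat => if !(hexA c) then some false else segLoopA rest (some true)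
-- (the Python 'break' immediately returns etat = False; since etat is never read again before return, returning it is the same)

def est_segment_valide (segment : List Char) : Option Bool :=
  if segment.length = 2 then segLoopA segment none else some false

-- Python truthiness of est_segment_valide's result (None and False are falsy)
def truthyA : Option Bool → Bool
  | some b => b
  | none => false

-- the outer 'for segment in mesSegments' loop with break (etat starts True)
def ipLoopA : List (List Char) → Bool
  | [] => true
  | s :: rest => if !(truthyA (est_segment_valide s)) then false else ipLoopA rest

def est_ip_valide (ip : String) : Bool :=
  let sep : List Char := if PySem.Str.isIn ":" ip then ":".toList else "-".toList
  let mesSegments := PySem.Chars.splitOn ip.toList sep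
  if mesSegments.length = 6 then ipLoopA mesSegments else false

-- ===== PORT B =====
def hexB (c : Char) : Bool := PySem.Chars.isIn [c] "0123456789ABCDEF".toList

-- the single 'for c in ip' scan of Source B: pos = chars in current segment, segs = current segment index
def scanB (sep : Char) : List Char → Nat → Nat → Bool
  | [], pos, segs => segs == 6 && pos == 2
  | c :: rest, pos, segs =>
    if c == sep then
      if pos != 2 then false else scanB sep rest 0 (segs + 1)
    else
      if pos == 2 || !(hexB c) then false
      else scanB sep rest (pos + 1) segs

def est_ip_valide_alt (ip : String) : Bool :=
  let sep : Char := if PySem.Str.isIn ":" ip then ':' else '-'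
  scanB sep ip.toList 0 1

-- ===== PRECONDITION & SPEC =====
def Spec_est_ip_valide (ip : String) (out : Bool) : Prop := out = est_ip_valide_alt ip
instance (ip : String) (out : Bool) : Decidable (Spec_est_ip_valide ip out) := by unfold Spec_est_ip_valide; infer_instance

-- ===== CLAIM (what is proved, stated in full; the proofs are below) =====
def Claim_equal_est_ip_valide : Prop := ∀ (ip : String), Dom_est_ip_valide ip → Spec_est_ip_valide ip (est_ip_valide ip)

-- ===== LEMMAS AND PROOFS =====

-- proof-side model of Python's str.split with a one-character separator
def mySplits (sep : Char) : List Char → List (List Char)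
  | [] => [[]]
  | c :: rest =>
    if c = sep then [] :: mySplits sep rest
    else
      match mySplits sep rest with
      | [] => [[c]]
      | s :: ss => (c :: s) :: ss

theorem mySplits_ne_nil (sep : Char) (l : List Char) : mySplits sep l ≠ [] := by
  induction l with
  | nil => simp [mySplits]
  | cons c rest ih =>
    simp only [mySplits]
    split
    · simp
    · cases h : mySplits sep rest <;> simp

theorem mySplits_cons_ex (sep : Char) (l : List Char) :
    ∃ s ss, mySplits sep l = s :: ss := by
  cases h : mySplits sep l with
  | nil => exact absurd h (mySplits_ne_nil _ _)
  | cons s ss => exact ⟨s, ss, rfl⟩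

theorem splitOn_go_eq (sepc : Char) (l : List Char) :
    ∀ (fuel : Nat) (cur : List Char) (acc : List (List Char)), l.length < fuel →
      PySem.Chars.splitOn.go [sepc] fuel l cur acc =
        acc.reverse ++ (match mySplits sepc l with
          | [] => []
          | s :: ss => (cur.reverse ++ s) :: ss) := by
  induction l with
  | nil =>
    intro fuel cur acc hf
    match fuel, hf with
    | f + 1, _ => simp [PySem.Chars.splitOn.go, mySplits]
  | cons c rest ih =>
    intro fuel cur acc hf
    match fuel, hf with
    | f + 1, hf =>
      have hrest : rest.length < f := by simpa using Nat.lt_of_succ_lt_succ hf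
      obtain ⟨s, ss, hms⟩ := mySplits_cons_ex sepc rest
      by_cases hc : c = sepc
      · have hpre : List.isPrefixOf [sepc] (c :: rest) = true := by
          simp [List.isPrefixOf, hc]
        rw [show PySem.Chars.splitOn.go [sepc] (f + 1) (c :: rest) cur acc =
              PySem.Chars.splitOn.go [sepc] f (List.drop 1 (c :: rest)) [] (cur.reverse :: acc) by
            simp [PySem.Chars.splitOn.go, hpre]]
        simp only [List.drop_succ_cons, List.drop_zero]
        rw [ih f [] (cur.reverse :: acc) hrest]
        simp [mySplits, hc, hms]
      · have hpre : List.isPrefixOf [sepc] (c :: rest) = false := by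
          simp [List.isPrefixOf]
          exact fun h => hc h.symm
        rw [show PySem.Chars.splitOn.go [sepc] (f + 1) (c :: rest) cur acc =
              PySem.Chars.splitOn.go [sepc] f rest (c :: cur) acc by
            simp [PySem.Chars.splitOn.go, hpre]]
        rw [ih f (c :: cur) acc hrest]
        simp [mySplits, hc, hms]

theorem splitOn_single (sepc : Char) (cs : List Char) :
    PySem.Chars.splitOn cs [sepc] = mySplits sepc cs := by
  have h := splitOn_go_eq sepc cs (cs.length + 1) [] [] (Nat.lt_succ_self _)
  rw [PySem.Chars.splitOn, h]
  obtain ⟨s, ss, hms⟩ := mySplits_cons_ex sepc cs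
  simp [hms]

-- a segment is valid iff it has length 2 and all hex
def segOk (s : List Char) : Bool := decide (s.length = 2) && s.all hexB

theorem hexA_eq_hexB : hexA = hexB := rfl

theorem segLoopA_eq (s : List Char) (h : s ≠ []) :
    ∀ e, segLoopA s e = some (s.all hexA) := by
  induction s with
  | nil => exact absurd rfl h
  | cons c rest ih =>
    intro e
    simp only [segLoopA, List.all_cons]
    by_cases hc : hexA c = true
    · cases rest with
      | nil => simp [segLoopA, hc]
      | cons d u => rw [ih (by simp) (some true)]; simp [hc]
    · simp [Bool.eq_false_iff.mpr hc]

theorem truthy_est_segment (s : List Char) : truthyA (est_segment_valide s) = segOk s := by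
  unfold est_segment_valide segOk
  by_cases h2 : s.length = 2
  · have hne : s ≠ [] := by intro h; simp [h] at h2
    rw [if_pos h2, segLoopA_eq s hne none, hexA_eq_hexB]
    simp [truthyA, h2]
  · rw [if_neg h2]
    simp [truthyA, h2]

theorem ipLoopA_eq (l : List (List Char)) : ipLoopA l = l.all segOk := by
  induction l with
  | nil => rfl
  | cons s rest ih =>
    simp only [ipLoopA, List.all_cons, truthy_est_segment, ih]
    cases segOk s <;> simp

-- the scan, started in state (pos, segs), in terms of the split
theorem scanB_eq (sep : Char) (cs : List Char) :
    ∀ (pos segs : Nat),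
      scanB sep cs pos segs =
        match mySplits sep cs with
        | [] => true
        | s :: ss =>
          decide (segs + (s :: ss).length = 7) && decide (pos + s.length = 2) &&
            s.all hexB && ss.all segOk := by
  induction cs with
  | nil =>
    intro pos segs
    simp only [scanB, mySplits, List.length_cons, List.length_nil, List.all_nil,
      Bool.and_true]
    by_cases h6 : segs = 6 <;> by_cases hp : pos = 2 <;>
      simp [h6, hp]
  | cons c rest ih =>
    intro pos segs
    obtain ⟨s, ss, hms⟩ := mySplits_cons_ex sep rest
    by_cases hc : c = sep
    · simp only [scanB, beq_iff_eq, hc, if_true, mySplits, hms]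
      by_cases hp : pos = 2
      · rw [if_neg (by simp [hp]), ih 0 (segs + 1), hms]
        have h7 : segs + 1 + (ss.length + 1) = segs + (ss.length + 1 + 1) := by omega
        simp only [List.length_cons, List.all_cons, segOk, Nat.zero_add, hp, h7]
        simp [Bool.and_assoc, Bool.and_comm, Bool.and_left_comm]
        rw [Bool.eq_iff_iff]; simp
      · rw [if_pos (by simp [hp])]
        simp [hp]
    · have hb : (c == sep) = false := by simp [hc]
      simp only [scanB, hb, Bool.false_eq_true, if_false, mySplits, if_neg hc, hms]
      by_cases hp : pos = 2
      · rw [if_pos (by simp [hp])]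
        simp [hp]
      · by_cases hx : hexB c = true
        · rw [if_neg (by simp [hp, hx]), ih (pos + 1) segs, hms]
          have h2 : pos + 1 + s.length = pos + (s.length + 1) := by omega
          simp [List.all_cons, hx, h2, Bool.and_comm, Bool.and_left_comm]
          rw [Bool.eq_iff_iff]; simp
        · rw [if_pos (by simp [Bool.eq_false_iff.mpr hx])]
          simp [List.all_cons, Bool.eq_false_iff.mpr hx]

-- the whole equivalence at the list level, for any one-character separator
theorem key (sepc : Char) (cs : List Char) :
    (if (PySem.Chars.splitOn cs [sepc]).length = 6 then
        ipLoopA (PySem.Chars.splitOn cs [sepc]) else false) = scanB sepc cs 0 1 := by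
  rw [splitOn_single, ipLoopA_eq, scanB_eq]
  obtain ⟨s, ss, hms⟩ := mySplits_cons_ex sepc cs
  rw [hms]
  simp only [List.length_cons, List.all_cons, segOk, Nat.zero_add]
  by_cases h6 : ss.length + 1 = 6
  · rw [if_pos h6]
    simp [h6, Bool.and_assoc]
  · rw [if_neg h6]
    have h7 : ¬(1 + (ss.length + 1) = 7) := by omega
    simp [h7]

-- ===== VERDICT (by name: the statement is the Claim_ definition above) =====
theorem est_ip_valide_spec : Claim_equal_est_ip_valide := by
  intro ip _
  unfold Spec_est_ip_valide est_ip_valide est_ip_valide_alt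
  by_cases h : PySem.Str.isIn ":" ip = true
  · simpa only [h, if_true] using key ':' ip.toList
  · simp only [Bool.not_eq_true] at h
    simpa only [h, Bool.false_eq_true, if_false] using key '-' ip.toList
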